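-- pv_equiv track=rewrite | github.com/begeospatial/seams-app | seams_app/services/benthos_interpretation.py | generate_toggle_buttons_grid
-- ===== SOURCE A (Python) =====
-- def generate_toggle_buttons_grid(n_rows=3):
--     grid =[]
--     counter = 0
--     for i in range(n_rows):
--         row = []
--         if i % 2 == 0:
--             # Even row: divide into 3
--             for j in range(3):
--                 counter += 1
--                 row.append(str(counter))  # __Row_{i+1}_Col{j+1}
--         else:
--             # Odd row: divide into 4
--             for j in range(4):
--                 counter += 1
--                 row.append(str(counter))
--         grid.append(row)
--
--     return grid
-- ===== SOURCE B (Python) =====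
-- def generate_toggle_buttons_grid(n_rows=3):
--     widths = [3 if i % 2 == 0 else 4 for i in range(n_rows)]
--     flat = [str(k) for k in range(1, sum(widths) + 1)]
--     grid = []
--     start = 0
--     for w in widths:
--         grid.append(flat[start:start + w])
--         start += w
--     return grid
-- ===== Notes on version B (the rewrite author's own statement) =====
-- stated objective: alternative
-- what changed: Replaces the nested loops threading a running counter with a build-then-chunk pass: precompute the per-row widths, build one flat list of numbered strings, then slice it into rows at running offsets.
import Mathlib
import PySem

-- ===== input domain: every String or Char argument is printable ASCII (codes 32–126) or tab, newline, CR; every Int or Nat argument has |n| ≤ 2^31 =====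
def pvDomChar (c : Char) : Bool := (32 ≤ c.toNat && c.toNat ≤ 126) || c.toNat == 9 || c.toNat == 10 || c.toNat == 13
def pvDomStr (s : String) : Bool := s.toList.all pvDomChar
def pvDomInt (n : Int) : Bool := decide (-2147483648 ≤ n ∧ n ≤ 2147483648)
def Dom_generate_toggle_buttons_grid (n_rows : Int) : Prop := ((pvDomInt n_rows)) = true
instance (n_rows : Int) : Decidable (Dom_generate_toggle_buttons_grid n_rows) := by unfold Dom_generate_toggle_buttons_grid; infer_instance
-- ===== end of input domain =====

-- B replaces A's nested loops with a build-then-chunk pass (widths, flat numbered list, slicing); same cost, different shape.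

-- ===== PORT A =====
def generate_toggle_buttons_grid (n_rows : Int) : List (List String) :=
  ((PySem.List.pyRange 0 n_rows 1).foldl
    (fun (st : List (List String) × Int) i =>
      if PySem.Int.mod i 2 == 0 then
        -- Even row: divide into 3
        let rc := (PySem.List.pyRange 0 3 1).foldl
          (fun (rc : List String × Int) _ => (rc.1 ++ [PySem.Int.toStr (rc.2 + 1)], rc.2 + 1))
          ([], st.2)
        (st.1 ++ [rc.1], rc.2)
      else
        -- Odd row: divide into 4
        let rc := (PySem.List.pyRange 0 4 1).foldl
          (fun (rc : List String × Int) _ => (rc.1 ++ [PySem.Int.toStr (rc.2 + 1)], rc.2 + 1))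
          ([], st.2)
        (st.1 ++ [rc.1], rc.2))
    ([], 0)).1

-- ===== PORT B =====
def generate_toggle_buttons_grid_alt (n_rows : Int) : List (List String) :=
  let widths := (PySem.List.pyRange 0 n_rows 1).map
    (fun i => if PySem.Int.mod i 2 == 0 then (3 : Int) else 4)
  let total := widths.foldl (· + ·) 0
  let flat := (PySem.List.pyRange 1 (total + 1) 1).map PySem.Int.toStr
  (widths.foldl
    (fun (st : List (List String) × Int) w =>
      (st.1 ++ [PySem.List.slice flat (some st.2) (some (st.2 + w))], st.2 + w))
    ([], 0)).1

-- ===== PRECONDITION & SPEC =====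
def Spec_generate_toggle_buttons_grid (n_rows : Int) (out : List (List String)) : Prop := out = generate_toggle_buttons_grid_alt n_rows
instance (n_rows : Int) (out : List (List String)) : Decidable (Spec_generate_toggle_buttons_grid n_rows out) := by unfold Spec_generate_toggle_buttons_grid; infer_instance

-- ===== CLAIM (what is proved, stated in full; the proofs are below) =====
def Claim_equal_generate_toggle_buttons_grid : Prop := ∀ (n_rows : Int), Dom_generate_toggle_buttons_grid n_rows → Spec_generate_toggle_buttons_grid n_rows (generate_toggle_buttons_grid n_rows)

-- ===== LEMMAS AND PROOFS =====

-- width of row k, its running offset, the row of numbered strings starting after c, and the reference grid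
def pvW (k : Nat) : Nat := if k % 2 = 0 then 3 else 4
def pvOff : Nat → Int
  | 0 => 0
  | k + 1 => pvOff k + pvW k
def pvRow (c : Int) (w : Nat) : List String := (List.range w).map (fun (j : Nat) => PySem.Int.toStr (c + (j : Int) + 1))
def pvG : Nat → List (List String)
  | 0 => []
  | k + 1 => pvG k ++ [pvRow (pvOff k) (pvW k)]

lemma pvOff_nonneg (k : Nat) : 0 ≤ pvOff k := by
  induction k with
  | zero => simp [pvOff]
  | succ k ih => unfold pvOff; have : (0:Int) ≤ (pvW k : Int) := by positivity
                 omega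

lemma pv_mod2 (k : Nat) : (PySem.Int.mod (k : Int) 2 == 0) = (k % 2 == 0) := by
  rw [PySem.Int.mod_eq_emod_of_pos (by norm_num : (0:Int) < 2)]
  rcases Nat.even_or_odd k with h | h
  · obtain ⟨m, hm⟩ := h
    subst hm; simp
    omega
  · obtain ⟨m, hm⟩ := h
    subst hm
    have h1 : ((2 * m + 1 : Nat) : Int) % 2 = 1 := by push_cast; omega
    have h2 : (2 * m + 1) % 2 = 1 := by omega
    simp [h2]

-- A's fold state after the first k rows
lemma pvA_state (k : Nat) :
    ((PySem.List.pyRange 0 k 1).foldl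
      (fun (st : List (List String) × Int) i =>
        if PySem.Int.mod i 2 == 0 then
          let rc := (PySem.List.pyRange 0 3 1).foldl
            (fun (rc : List String × Int) _ => (rc.1 ++ [PySem.Int.toStr (rc.2 + 1)], rc.2 + 1))
            ([], st.2)
          (st.1 ++ [rc.1], rc.2)
        else
          let rc := (PySem.List.pyRange 0 4 1).foldl
            (fun (rc : List String × Int) _ => (rc.1 ++ [PySem.Int.toStr (rc.2 + 1)], rc.2 + 1))
            ([], st.2)
          (st.1 ++ [rc.1], rc.2))
      ([], 0)) = (pvG k, pvOff k) := by
  induction k with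
  | zero => simp [PySem.List.pyRange_one_eq_nil, pvG, pvOff]
  | succ k ih =>
    have h : ((k : Int) + 1) = ((k + 1 : Nat) : Int) := by push_cast; ring
    rw [show ((k+1 : Nat) : Int) = (k : Int) + 1 by push_cast; ring,
        PySem.List.pyRange_one_succ_right (by positivity), List.foldl_append, ih]
    have h3 : PySem.List.pyRange 0 3 1 = [0, 1, 2] := by decide
    have h4 : PySem.List.pyRange 0 4 1 = [0, 1, 2, 3] := by decide
    simp only [List.foldl_cons, List.foldl_nil, pv_mod2, h3, h4]
    by_cases hk : k % 2 = 0
    · simp [hk, pvG, pvOff, pvW, pvRow, List.range_succ]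
      and_intros <;> ring
    · simp [hk, pvG, pvOff, pvW, pvRow, List.range_succ]
      and_intros <;> ring

-- B's widths list and its sum
lemma pvB_widths (k : Nat) :
    (PySem.List.pyRange 0 k 1).map (fun i => if PySem.Int.mod i 2 == 0 then (3 : Int) else 4)
      = (List.range k).map (fun (j : Nat) => (pvW j : Int)) := by
  induction k with
  | zero => simp [PySem.List.pyRange_one_eq_nil]
  | succ k ih =>
    rw [show ((k+1 : Nat) : Int) = (k : Int) + 1 by push_cast; ring,
        PySem.List.pyRange_one_succ_right (by positivity), List.range_succ]
    simp only [List.map_append, ih, List.map_cons, List.map_nil, pv_mod2]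
    by_cases hk : k % 2 = 0 <;> simp [hk, pvW]

-- slicing the flat list of numbered strings
lemma pv_slice_flat (T : Int) (c : Int) (hc : 0 ≤ c) (w : Nat) (hw : c + w ≤ T) :
    PySem.List.slice ((PySem.List.pyRange 1 (T + 1) 1).map PySem.Int.toStr) (some c) (some (c + w))
      = pvRow c w := by
  obtain ⟨cn, rfl⟩ := Int.eq_ofNat_of_zero_le hc
  rw [PySem.List.slice_natCast_add]
  have hsplit : PySem.List.pyRange 1 (T + 1) 1
      = PySem.List.pyRange 1 (1 + cn) 1 ++ PySem.List.pyRange (1 + cn) (T + 1) 1 :=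
    PySem.List.pyRange_one_append _ _ _ (by omega) (by omega)
  have hlen : (PySem.List.pyRange 1 (1 + cn) 1).length = cn := by
    rw [PySem.List.length_pyRange_one]; omega
  rw [hsplit, List.map_append, List.drop_append, List.length_map, hlen]
  rw [List.drop_of_length_le (by simp [hlen]), Nat.sub_self, List.drop_zero, List.nil_append]
  have hsplit2 : PySem.List.pyRange (1 + cn) (T + 1) 1
      = PySem.List.pyRange (1 + cn) (1 + cn + w) 1 ++ PySem.List.pyRange (1 + cn + w) (T + 1) 1 :=
    PySem.List.pyRange_one_append _ _ _ (by omega) (by omega)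
  have hlen2 : (PySem.List.pyRange (1 + cn) (1 + cn + w) 1).length = w := by
    rw [PySem.List.length_pyRange_one]; omega
  rw [hsplit2, List.map_append, List.take_append, List.length_map, hlen2]
  rw [List.take_of_length_le (by simp [hlen2]), Nat.sub_self, List.take_zero, List.append_nil]
  rw [PySem.List.pyRange_one]
  have he : ((1 + (cn : Int) + w) - (1 + cn)).toNat = w := by omega
  rw [he, pvRow, List.map_map]
  apply List.map_congr_left
  intro j _
  simp only [Function.comp_apply]
  congr 1
  ring

-- the chunking pass of B, in recursive form
def pvChunks (flat : List String) : List Nat → Int → List (List String)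
  | [], _ => []
  | w :: ws, s => PySem.List.slice flat (some s) (some (s + w)) :: pvChunks flat ws (s + w)

-- B's fold is chunking
lemma pvB_fold (flat : List String) (ws : List Nat) (g0 : List (List String)) (s0 : Int) :
    ((ws.map (fun (w : Nat) => (w : Int))).foldl
      (fun (st : List (List String) × Int) w =>
        (st.1 ++ [PySem.List.slice flat (some st.2) (some (st.2 + w))], st.2 + w))
      (g0, s0))
    = (g0 ++ pvChunks flat ws s0, s0 + ((ws.map (fun (w : Nat) => (w : Int))).sum)) := by
  induction ws generalizing g0 s0 with
  | nil => simp [pvChunks]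
  | cons w ws ih =>
    simp only [List.map_cons, List.foldl_cons, pvChunks, List.sum_cons]
    rw [ih]
    refine Prod.ext ?_ ?_
    · simp
    · simp only []
      ring

lemma pv_sum_W (k : Nat) : (((List.range k).map pvW).map (fun (w : Nat) => (w : Int))).sum = pvOff k := by
  induction k with
  | zero => simp [pvOff]
  | succ k ih =>
    rw [List.range_succ]
    simp only [List.map_append, List.map_cons, List.map_nil, List.sum_append, List.sum_cons,
      List.sum_nil, ih]
    simp [pvOff]

lemma pvChunks_append (flat : List String) (ws : List Nat) (w : Nat) (s : Int) :
    pvChunks flat (ws ++ [w]) s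
      = pvChunks flat ws s
        ++ [PySem.List.slice flat (some (s + (ws.map (fun (v : Nat) => (v : Int))).sum))
              (some (s + (ws.map (fun (v : Nat) => (v : Int))).sum + w))] := by
  induction ws generalizing s with
  | nil => simp [pvChunks]
  | cons v ws ih => simp [pvChunks, ih, add_assoc]

lemma pvChunks_eq_G (T : Int) (k : Nat) (hk : pvOff k ≤ T) :
    pvChunks ((PySem.List.pyRange 1 (T + 1) 1).map PySem.Int.toStr) ((List.range k).map pvW) 0 = pvG k := by
  induction k with
  | zero => simp [pvChunks, pvG]
  | succ k ih =>
    have hW : (0:Int) ≤ (pvW k : Int) := by positivity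
    have hk' : pvOff k ≤ T := by unfold pvOff at hk; omega
    rw [List.range_succ, List.map_append, List.map_singleton, pvChunks_append, ih hk', pv_sum_W]
    have hrow : PySem.List.slice ((PySem.List.pyRange 1 (T + 1) 1).map PySem.Int.toStr)
        (some (0 + pvOff k)) (some (0 + pvOff k + pvW k)) = pvRow (pvOff k) (pvW k) := by
      rw [zero_add]
      exact pv_slice_flat T (pvOff k) (pvOff_nonneg k) (pvW k) (by unfold pvOff at hk; omega)
    rw [hrow]
    rfl

-- ===== VERDICT (by name: the statement is the Claim_ definition above) =====
theorem generate_toggle_buttons_grid_spec : Claim_equal_generate_toggle_buttons_grid := by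
  intro n _
  unfold Spec_generate_toggle_buttons_grid
  simp only [generate_toggle_buttons_grid, generate_toggle_buttons_grid_alt]
  by_cases h : n ≤ 0
  · rw [PySem.List.pyRange_one_eq_nil h]
    simp
  · push_neg at h
    obtain ⟨k, rfl⟩ := Int.eq_ofNat_of_zero_le h.le
    rw [pvA_state k, pvB_widths k]
    have hmm : (List.range k).map (fun (j : Nat) => (pvW j : Int))
        = ((List.range k).map pvW).map (fun (w : Nat) => (w : Int)) := by
      rw [List.map_map]; rfl
    rw [hmm, List.sum_eq_foldl.symm, pv_sum_W k]
    rw [pvB_fold, pvChunks_eq_G (pvOff k) k le_rfl]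
    simp
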